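-- pv_equiv track=rewrite | github.com/nafisadmankhan/chatbot-ubot | model.py | nahidOrg_processing_context
-- ===== SOURCE A (Python) =====
-- def nahidOrg_processing_context(docs, max_tokens=1536):
--     processed_docs = []
--     total_tokens = 0
--     for doc in docs:
--         tokens = len(doc.split())
--         if total_tokens + tokens <= max_tokens:
--             processed_docs.append(doc)
--             total_tokens += tokens
--         else:
--             break
--     return "\n".join(f"- {doc}" for doc in processed_docs)
-- ===== SOURCE B (Python) =====
-- def nahidOrg_processing_context(docs, max_tokens=1536):
--     # prefix sums of token counts, then cut at the first overflow index
--     cums = []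
--     s = 0
--     for d in docs:
--         s += len(d.split())
--         cums.append(s)
--     n = next((i for i, c in enumerate(cums) if c > max_tokens), len(docs))
--     return "\n".join("- " + d for d in docs[:n])
-- ===== Notes on version B (the rewrite author's own statement) =====
-- stated objective: alternative
-- what changed: B first builds the prefix-sum list of per-doc token counts, finds the first index whose cumulative sum exceeds max_tokens, and slices-and-joins that prefix, instead of A's single accumulator loop with an explicit break that appends kept docs one by one.
import Mathlib
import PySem

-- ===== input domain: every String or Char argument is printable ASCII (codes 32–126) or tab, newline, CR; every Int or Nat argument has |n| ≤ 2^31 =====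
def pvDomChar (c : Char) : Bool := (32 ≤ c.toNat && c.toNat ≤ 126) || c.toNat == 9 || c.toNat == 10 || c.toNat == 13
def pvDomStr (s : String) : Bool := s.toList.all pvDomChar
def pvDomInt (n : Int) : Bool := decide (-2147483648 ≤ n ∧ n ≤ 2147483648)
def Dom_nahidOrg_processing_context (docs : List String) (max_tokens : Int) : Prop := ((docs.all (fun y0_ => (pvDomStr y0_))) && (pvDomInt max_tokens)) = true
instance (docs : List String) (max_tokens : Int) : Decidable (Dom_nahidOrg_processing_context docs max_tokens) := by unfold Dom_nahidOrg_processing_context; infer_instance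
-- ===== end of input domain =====

-- ===== PORT A =====
-- B changes the decomposition: prefix sums + first-overflow cut instead of A's accumulator loop with break (alternative, not faster).
def pvGoA : List String → Int → Int → List String
  | [], _, _ => []
  | d :: rest, total, maxT =>
    let t : Int := ((PySem.Str.split₀ d).length : Int)
    if total + t ≤ maxT then d :: pvGoA rest (total + t) maxT else []

def nahidOrg_processing_context (docs : List String) (max_tokens : Int) : String :=
  PySem.Str.join "\n" ((pvGoA docs 0 max_tokens).map (fun d => "- " ++ d))

-- ===== PORT B =====
def pvCums : List String → Int → List Int
  | [], _ => []
  | d :: rest, s =>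
    let s' := s + ((PySem.Str.split₀ d).length : Int)
    s' :: pvCums rest s'

def nahidOrg_processing_context_alt (docs : List String) (max_tokens : Int) : String :=
  let cums := pvCums docs 0
  let n := (cums.findIdx? (fun c => max_tokens < c)).getD docs.length
  PySem.Str.join "\n" ((docs.take n).map (fun d => "- " ++ d))

-- ===== PRECONDITION & SPEC =====
def Spec_nahidOrg_processing_context (docs : List String) (max_tokens : Int) (out : String) : Prop := out = nahidOrg_processing_context_alt docs max_tokens
instance (docs : List String) (max_tokens : Int) (out : String) : Decidable (Spec_nahidOrg_processing_context docs max_tokens out) := by unfold Spec_nahidOrg_processing_context; infer_instance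

-- ===== CLAIM (what is proved, stated in full; the proofs are below) =====
def Claim_equal_nahidOrg_processing_context : Prop := ∀ (docs : List String) (max_tokens : Int), Dom_nahidOrg_processing_context docs max_tokens → Spec_nahidOrg_processing_context docs max_tokens (nahidOrg_processing_context docs max_tokens)

-- ===== LEMMAS AND PROOFS =====
theorem pvGoA_eq_take (docs : List String) (total maxT : Int) :
    pvGoA docs total maxT =
      docs.take (((pvCums docs total).findIdx? (fun c => maxT < c)).getD docs.length) := by
  induction docs generalizing total with
  | nil => simp [pvGoA, pvCums]
  | cons d rest ih =>
    simp only [pvGoA, pvCums, List.findIdx?_cons]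
    by_cases h : total + ((PySem.Str.split₀ d).length : Int) ≤ maxT
    · have h2 : ¬ (maxT < total + ((PySem.Str.split₀ d).length : Int)) := not_lt.mpr h
      simp only [if_pos h, h2, decide_false]
      rw [ih]
      cases hfi : (pvCums rest (total + ((PySem.Str.split₀ d).length : Int))).findIdx?
          (fun c => maxT < c) with
      | none => simp
      | some k => simp
    · have h2 : maxT < total + ((PySem.Str.split₀ d).length : Int) := not_le.mp h
      simp [if_neg h, h2]

-- ===== VERDICT (by name: the statement is the Claim_ definition above) =====
theorem nahidOrg_processing_context_spec : Claim_equal_nahidOrg_processing_context := by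
  intro docs max_tokens _
  unfold Spec_nahidOrg_processing_context nahidOrg_processing_context nahidOrg_processing_context_alt
  rw [pvGoA_eq_take]
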